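-- pv_equiv track=rewrite | github.com/Madhax/Kata | leetcode/weekly-218/3.py | concatenatedBinary
-- ===== SOURCE A (Python) =====
-- def concatenatedBinary(n: int) -> int:
--     retval = 0
--
--     iter = 1
--     binStr = ""
--     while iter <= n:
--         binStr += "{0:b}".format(iter)
--         iter += 1
--
--     return int(binStr, 2) % (10**9 + 7)
-- ===== SOURCE B (Python) =====
-- def concatenatedBinary(n: int) -> int:
--     MOD = 10**9 + 7
--     retval = 0
--     for i in range(1, n + 1):
--         retval = (retval * (1 << i.bit_length()) + i) % MOD
--     return retval
-- ===== Notes on version B (the rewrite author's own statement) =====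
-- stated objective: faster
-- what changed: Instead of building the whole concatenated binary string and parsing it as one huge integer, B keeps a running remainder and for each i shifts it left by i.bit_length() bits and adds i, reducing mod 1e9+7 at every step.
-- outside the precondition, e.g. on concatenatedBinary(0): A raises ValueError, B returns 0
import Mathlib
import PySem

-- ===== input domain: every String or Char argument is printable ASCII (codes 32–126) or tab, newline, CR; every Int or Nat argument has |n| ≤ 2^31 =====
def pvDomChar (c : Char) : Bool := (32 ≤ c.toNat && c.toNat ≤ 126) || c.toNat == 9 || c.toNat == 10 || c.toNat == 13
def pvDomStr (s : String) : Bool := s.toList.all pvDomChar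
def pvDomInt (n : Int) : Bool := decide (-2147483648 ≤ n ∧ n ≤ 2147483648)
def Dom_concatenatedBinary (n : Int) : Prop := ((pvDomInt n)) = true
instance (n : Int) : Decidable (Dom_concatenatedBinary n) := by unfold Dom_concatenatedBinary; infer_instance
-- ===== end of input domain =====

-- B replaces "build the whole concatenated binary string then parse it" by an incremental
-- modular shift (retval = (retval << bitlen(i) | i) % MOD per i); objective: faster (asymptotic).

-- ===== PORT A =====
-- "{0:b}".format(m) for a nonnegative integer m: its binary digits, empty for 0
-- (exact for m ≥ 0; A's loop only formats positive iter).
def pyBinChars (m : Nat) : List Char :=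
  if h : m = 0 then [] else pyBinChars (m / 2) ++ [if m % 2 = 1 then '1' else '0']
decreasing_by exact Nat.div_lt_self (Nat.pos_of_ne_zero h) one_lt_two

def concatenatedBinary (n : Int) : Int :=
  -- while iter <= n: binStr += "{0:b}".format(iter); iter += 1
  let binStr : List Char :=
    (PySem.List.pyRange 1 (n + 1) 1).foldl (fun s i => s ++ pyBinChars i.toNat) []
  -- int(binStr, 2): hand port, exact for nonempty strings of '0'/'1' digits
  (binStr.foldl (fun acc c => acc * 2 + (if c = '1' then 1 else 0)) (0 : Int)) % (10 ^ 9 + 7)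

-- ===== PORT B =====
-- i.bit_length() for a nonnegative integer (exact there; B's loop only uses positive i)
def bitLen (m : Nat) : Nat :=
  if h : m = 0 then 0 else bitLen (m / 2) + 1
decreasing_by exact Nat.div_lt_self (Nat.pos_of_ne_zero h) one_lt_two

def concatenatedBinary_alt (n : Int) : Int :=
  (PySem.List.pyRange 1 (n + 1) 1).foldl
    (fun r i => (r * 2 ^ bitLen i.toNat + i) % (10 ^ 9 + 7)) 0

-- ===== PRECONDITION & SPEC =====
-- For n ≤ 0 the loop never runs and int("", 2) raises ValueError; those inputs are excluded.
def Pre_concatenatedBinary (n : Int) : Prop := 1 ≤ n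
instance (n : Int) : Decidable (Pre_concatenatedBinary n) := by
  unfold Pre_concatenatedBinary; infer_instance

def pvWitness_concatenatedBinary : Int := 5

def Spec_concatenatedBinary (n : Int) (out : Int) : Prop := out = concatenatedBinary_alt n
instance (n : Int) (out : Int) : Decidable (Spec_concatenatedBinary n out) := by
  unfold Spec_concatenatedBinary; infer_instance

-- ===== CLAIM (what is proved, stated in full; the proofs are below) =====
def Claim_equal_concatenatedBinary : Prop :=
  ∀ (n : Int), Dom_concatenatedBinary n → Pre_concatenatedBinary n →
    Spec_concatenatedBinary n (concatenatedBinary n)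

-- ===== LEMMAS AND PROOFS =====

-- parsing the binary digits of m starting from accumulator a shifts a by bitLen m and adds m
theorem binChars_parse (m : Nat) :
    ∀ a : Int,
      (pyBinChars m).foldl (fun acc c => acc * 2 + (if c = '1' then 1 else 0)) a
        = a * 2 ^ bitLen m + (m : Int) := by
  induction m using Nat.strong_induction_on with
  | _ m ih =>
    intro a
    by_cases h : m = 0
    · subst h; simp [pyBinChars, bitLen]
    · rw [pyBinChars, dif_neg h, bitLen, dif_neg h, List.foldl_append,
        ih (m / 2) (Nat.div_lt_self (Nat.pos_of_ne_zero h) one_lt_two)]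
      have hmi : (m : Int) = 2 * (↑(m / 2)) + (↑(m % 2) : Int) := by
        exact_mod_cast (Nat.div_add_mod m 2).symm
      rcases Nat.mod_two_eq_zero_or_one m with h2 | h2 <;>
        rw [hmi, h2] <;> simp <;> ring

-- parsing the foldl-built concatenation equals folding the shift-and-add step
theorem parse_concat (l : List Int) :
    ∀ s : List Char,
      ((l.foldl (fun s i => s ++ pyBinChars i.toNat) s).foldl
          (fun acc c => acc * 2 + (if c = '1' then 1 else 0)) 0)
        = l.foldl (fun a i => a * 2 ^ bitLen i.toNat + (i.toNat : Int))
            (s.foldl (fun acc c => acc * 2 + (if c = '1' then 1 else 0)) 0) := by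
  induction l with
  | nil => intro s; rfl
  | cons x xs ih =>
    intro s
    simp only [List.foldl_cons]
    rw [ih (s ++ pyBinChars x.toNat), List.foldl_append, binChars_parse]

-- reducing mod M at every step agrees with reducing once at the end
theorem fold_mod (l : List Int) :
    ∀ a : Int,
      l.foldl (fun r i => (r * 2 ^ bitLen i.toNat + i) % (10 ^ 9 + 7)) (a % (10 ^ 9 + 7))
        = (l.foldl (fun r i => r * 2 ^ bitLen i.toNat + i) a) % (10 ^ 9 + 7) := by
  induction l with
  | nil => intro a; simp
  | cons x xs ih =>
    intro a
    simp only [List.foldl_cons]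
    have key : (a % (10 ^ 9 + 7) * 2 ^ bitLen x.toNat + x) % (10 ^ 9 + 7)
        = (a * 2 ^ bitLen x.toNat + x) % (10 ^ 9 + 7) := by
      conv_rhs => rw [Int.add_emod, Int.mul_emod]
      conv_lhs => rw [Int.add_emod, Int.mul_emod, Int.emod_emod_of_dvd a dvd_rfl]
    rw [key, ← ih]

-- ===== VERDICT (by name: the statement is the Claim_ definition above) =====
theorem concatenatedBinary_spec : Claim_equal_concatenatedBinary := by
  intro n _ _
  show (((PySem.List.pyRange 1 (n + 1) 1).foldl (fun s i => s ++ pyBinChars i.toNat)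
      []).foldl (fun acc c => acc * 2 + (if c = '1' then 1 else 0)) 0) % (10 ^ 9 + 7)
    = (PySem.List.pyRange 1 (n + 1) 1).foldl
        (fun r i => (r * 2 ^ bitLen i.toNat + i) % (10 ^ 9 + 7)) 0
  rw [parse_concat]
  have h0 : (0 : Int) = 0 % (10 ^ 9 + 7) := rfl
  rw [h0, fold_mod]
  simp only [← h0]
  congr 1
  apply PySem.List.foldl_congr_mem
  intro a x hx
  have hx1 : (1 : Int) ≤ x := (PySem.List.mem_pyRange_one.mp hx).1
  rw [Int.toNat_of_nonneg (by omega)]
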